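-- pv_equiv track=rewrite | github.com/Jooh34/algorithm | programmers/43162.py | solution
-- ===== SOURCE A (Python) =====
-- def solution(n, computers):
--     answer = 0
--     visited = [False for i in range(n)]
--
--     for i in range(n):
--         if not visited[i]:
--             visited[i] = True
--             answer += 1
--             traverse(i, computers, visited)
--
--
--     return answer
--
-- def traverse(i, computers, visited):
--     for j, conn in enumerate(computers[i]):
--         if conn == 1 and not visited[j] :
--             visited[j] = True
--             traverse(j, computers, visited)
-- ===== SOURCE B (Python) =====
-- def solution(n, computers):
--     answer = 0
--     visited = [False] * n
--     for i in range(n):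
--         if not visited[i]:
--             visited[i] = True
--             answer += 1
--             stack = [i]
--             while stack:
--                 u = stack.pop()
--                 for j, conn in enumerate(computers[u]):
--                     if conn == 1 and not visited[j]:
--                         visited[j] = True
--                         stack.append(j)
--     return answer
-- ===== Notes on version B (the rewrite author's own statement) =====
-- stated objective: alternative
-- what changed: The recursive DFS helper is replaced by an explicit stack-based worklist DFS inside the same outer scan, so the Python call stack disappears (no RecursionError risk on long chains); neighbor tests are identical, so asymmetric matrices behave the same.
import Mathlib
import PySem

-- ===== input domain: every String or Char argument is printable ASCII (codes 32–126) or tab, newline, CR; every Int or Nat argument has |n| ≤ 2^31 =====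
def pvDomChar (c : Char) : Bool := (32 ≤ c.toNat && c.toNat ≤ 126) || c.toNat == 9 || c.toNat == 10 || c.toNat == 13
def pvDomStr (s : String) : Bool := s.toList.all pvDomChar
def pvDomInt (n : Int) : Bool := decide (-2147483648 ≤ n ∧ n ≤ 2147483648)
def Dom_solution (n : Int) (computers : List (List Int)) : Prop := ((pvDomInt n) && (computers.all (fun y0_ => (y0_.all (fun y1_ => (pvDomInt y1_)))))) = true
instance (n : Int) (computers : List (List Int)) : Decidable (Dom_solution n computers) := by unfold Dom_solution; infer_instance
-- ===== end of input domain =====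

-- B replaces A's recursive DFS helper by an explicit stack-based worklist DFS (same outer
-- scan, identical neighbor tests); equal return value, no recursion. Both Pythons mutate
-- only locals, no observable argument mutation of `computers`.

-- ===== PORT A =====
-- A's recursion is ported with a fuel parameter (n+1, more than the possible recursion
-- depth: each nested call first flips an unvisited node) that only makes it total; the
-- computation inside Pre_ (where Python A returns) never exhausts it.
mutual
-- traverse(i, computers, visited)
def pvTraverseA (computers : List (List Int)) (fuel : Nat) (i : Nat) (visited : List Bool) : List Bool :=
  match fuel with
  | 0 => visited
  | fuel' + 1 => pvGoA computers fuel' (computers.getD i []) 0 visited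
termination_by (fuel, 0)
-- the 'for j, conn in enumerate(computers[i])' loop, j the running index
def pvGoA (computers : List (List Int)) (fuel : Nat) (row : List Int) (j : Nat) (visited : List Bool) : List Bool :=
  match row with
  | [] => visited
  | conn :: rest =>
    if conn = 1 ∧ visited.getD j false = false then
      pvGoA computers fuel rest (j + 1) (pvTraverseA computers fuel j (visited.set j true))
    else
      pvGoA computers fuel rest (j + 1) visited
termination_by (fuel, row.length + 1)
end

-- the 'for i in range(n)' loop carrying (answer, visited)
def pvLoopA (computers : List (List Int)) (fuel : Nat) (idxs : List Nat) (answer : Int) (visited : List Bool) : Int :=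
  match idxs with
  | [] => answer
  | i :: rest =>
    if visited.getD i false = false then
      pvLoopA computers fuel rest (answer + 1) (pvTraverseA computers fuel i (visited.set i true))
    else
      pvLoopA computers fuel rest answer visited

def solution (n : Int) (computers : List (List Int)) : Int :=
  pvLoopA computers (n.toNat + 1) (List.range n.toNat) 0 (List.replicate n.toNat false)

-- ===== PORT B =====
-- the inner 'for j, conn in enumerate(computers[u])' loop: marks and pushes; stack head = top
def pvScanB (row : List Int) (j : Nat) (visited : List Bool) (stack : List Nat) : List Bool × List Nat :=
  match row with
  | [] => (visited, stack)
  | conn :: rest =>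
    if conn = 1 ∧ visited.getD j false = false then
      pvScanB rest (j + 1) (visited.set j true) (j :: stack)
    else
      pvScanB rest (j + 1) visited stack

-- the 'while stack:' loop; fuel (n+1) only makes it total: each iteration pops once and
-- every push first flips an unvisited node, so inside Pre_ it never runs out
def pvRunB (computers : List (List Int)) : Nat → List Nat → List Bool → List Bool
  | 0, _, visited => visited
  | _ + 1, [], visited => visited
  | fuel' + 1, u :: rest, visited =>
    let p := pvScanB (computers.getD u []) 0 visited rest
    pvRunB computers fuel' p.2 p.1

def pvLoopB (computers : List (List Int)) (fuel : Nat) (idxs : List Nat) (answer : Int) (visited : List Bool) : Int :=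
  match idxs with
  | [] => answer
  | i :: rest =>
    if visited.getD i false = false then
      pvLoopB computers fuel rest (answer + 1) (pvRunB computers fuel [i] (visited.set i true))
    else
      pvLoopB computers fuel rest answer visited

def solution_alt (n : Int) (computers : List (List Int)) : Int :=
  pvLoopB computers (n.toNat + 1) (List.range n.toNat) 0 (List.replicate n.toNat false)

-- ===== PRECONDITION & SPEC =====
-- Pre_ = exactly the inputs where Python A returns: every node i < n must have a row
-- (computers[i] exists) and every '1' entry in the first n rows must point below n
-- (otherwise visited[j] / computers[j] raises IndexError).
def Pre_solution (n : Int) (computers : List (List Int)) : Prop :=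
  n ≤ (computers.length : Int) ∧
  ∀ i ∈ List.range n.toNat, ∀ j ∈ List.range (computers.getD i []).length,
    (computers.getD i []).getD j 0 = 1 → j < n.toNat
instance (n : Int) (computers : List (List Int)) : Decidable (Pre_solution n computers) := by
  unfold Pre_solution; infer_instance

def pvWitness_solution : Int × List (List Int) := (3, [[1, 1, 0], [1, 1, 0], [0, 0, 1]])

def Spec_solution (n : Int) (computers : List (List Int)) (out : Int) : Prop := out = solution_alt n computers
instance (n : Int) (computers : List (List Int)) (out : Int) : Decidable (Spec_solution n computers out) := by unfold Spec_solution; infer_instance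

-- ===== CLAIM (what is proved, stated in full; the proofs are below) =====
def Claim_equal_solution : Prop := ∀ (n : Int) (computers : List (List Int)), Dom_solution n computers → Pre_solution n computers → Spec_solution n computers (solution n computers)

-- ===== LEMMAS AND PROOFS =====

-- visited[k] as a Bool (false beyond the end)
def pvGv (v : List Bool) (k : Nat) : Bool := v.getD k false
-- number of unvisited entries (the fuel measure)
def pvCnt (v : List Bool) : Nat := v.count false
-- the adjacency test both programs perform
def pvEdge (computers : List (List Int)) (u w : Nat) : Prop := (computers.getD u []).getD w 0 = 1
-- one traversal step into a not-yet-visited node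
def pvStep (computers : List (List Int)) (v : List Bool) (u w : Nat) : Prop :=
  pvEdge computers u w ∧ pvGv v w = false
def pvReach (computers : List (List Int)) (v : List Bool) (i k : Nat) : Prop :=
  Relation.ReflTransGen (pvStep computers v) i k
-- all edges out of the first N nodes stay below N
def pvBnd (computers : List (List Int)) (N : Nat) : Prop :=
  ∀ a b : Nat, a < N → pvEdge computers a b → b < N
-- pointwise growth of the visited list
def pvLe (v w : List Bool) : Prop :=
  v.length = w.length ∧ ∀ k, pvGv v k = true → pvGv w k = true

theorem pvGv_lt {v : List Bool} {k : Nat} (h : pvGv v k = true) : k < v.length := by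
  by_contra hk
  have hn : v[k]? = none := List.getElem?_eq_none (Nat.le_of_not_lt hk)
  simp [pvGv, List.getD, hn] at h

theorem pvGv_set_self {v : List Bool} {j : Nat} (hj : j < v.length) :
    pvGv (v.set j true) j = true := by
  simp [pvGv, List.getD, hj]

theorem pvGv_set_ne {v : List Bool} {j k : Nat} (h : k ≠ j) :
    pvGv (v.set j true) k = pvGv v k := by
  simp [pvGv, List.getD, List.getElem?_set_ne (Ne.symm h)]

theorem pvLe_refl (v : List Bool) : pvLe v v := ⟨rfl, fun _ h => h⟩

theorem pvLe_trans {u v w : List Bool} (h1 : pvLe u v) (h2 : pvLe v w) : pvLe u w :=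
  ⟨h1.1.trans h2.1, fun k hk => h2.2 k (h1.2 k hk)⟩

theorem pvLe_set (v : List Bool) (j : Nat) : pvLe v (v.set j true) := by
  refine ⟨(List.length_set).symm, fun k hk => ?_⟩
  by_cases hkj : k = j
  · subst hkj
    exact pvGv_set_self (pvGv_lt hk)
  · rwa [pvGv_set_ne hkj]

theorem pvCnt_set {v : List Bool} {j : Nat} (hj : j < v.length) (hv : pvGv v j = false) :
    pvCnt (v.set j true) + 1 = pvCnt v := by
  induction v generalizing j with
  | nil => simp at hj
  | cons a t ih =>
    cases j with
    | zero =>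
      have : a = false := by simpa [pvGv, List.getD] using hv
      subst this; simp [pvCnt, List.set]
    | succ m =>
      have hm : m < t.length := by simpa using hj
      have hv' : pvGv t m = false := by simpa [pvGv, List.getD] using hv
      have := ih hm hv'
      have e1 : (a :: t).set (m + 1) true = a :: t.set m true := rfl
      rw [e1]
      simp [pvCnt, List.count_cons] at this ⊢
      omega

theorem pvCnt_le_of_le {v w : List Bool} (h : pvLe v w) : pvCnt w ≤ pvCnt v := by
  obtain ⟨hlen, hmono⟩ := h
  induction v generalizing w with
  | nil => cases w <;> simp_all [pvCnt]
  | cons a t ih =>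
    cases w with
    | nil => simp at hlen
    | cons b s =>
      have hlen' : t.length = s.length := by simpa using hlen
      have hts : pvCnt s ≤ pvCnt t := by
        refine ih hlen' (fun k hk => ?_)
        have := hmono (k + 1)
        simpa [pvGv, List.getD] using this (by simpa [pvGv, List.getD] using hk)
      have hab : a = true → b = true := by
        have := hmono 0
        simpa [pvGv, List.getD] using this
      cases a <;> cases b <;> · simp_all [pvCnt]; try omega

theorem pvCnt_le_length (v : List Bool) : pvCnt v ≤ v.length := List.count_le_length

theorem pvList_eq_of_gv {v w : List Bool} (hlen : v.length = w.length)
    (h : ∀ k, pvGv v k = pvGv w k) : v = w := by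
  apply List.ext_getElem hlen
  intro k hk hk'
  have := h k
  simpa [pvGv, List.getD, List.getElem?_eq_getElem, hk, hk'] using this

theorem pvReach_anti {computers : List (List Int)} {v w : List Bool} (hle : pvLe v w)
    {a b : Nat} (h : pvReach computers w a b) : pvReach computers v a b := by
  refine Relation.ReflTransGen.mono (fun x y hxy => ?_) h
  refine ⟨hxy.1, ?_⟩
  cases hv : pvGv v y
  · rfl
  · exact absurd (hle.2 y hv) (by simp [hxy.2])

-- a row suffix pins down the entries of the full row
theorem pvRow_head {l : List Int} {j : Nat} {c : Int} {rest : List Int}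
    (h : l.drop j = c :: rest) : l.getD j 0 = c := by
  have h0 : (l.drop j)[(0 : Nat)]? = l[j + 0]? := List.getElem?_drop
  rw [h] at h0
  simp at h0
  simp [List.getD, ← h0]

theorem pvRow_tail {l : List Int} {j : Nat} {c : Int} {rest : List Int}
    (h : l.drop j = c :: rest) : l.drop (j + 1) = rest := by
  have : (l.drop j).drop 1 = l.drop (j + 1) := by
    rw [List.drop_drop]
  rw [← this, h]
  simp

-- ---------- monotonicity / length preservation ----------

theorem pvMonoA (computers : List (List Int)) :
    ∀ fuel : Nat,
      (∀ i v, pvLe v (pvTraverseA computers fuel i v)) ∧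
      (∀ row j v, pvLe v (pvGoA computers fuel row j v)) := by
  intro fuel
  induction fuel with
  | zero =>
    constructor
    · intro i v; rw [pvTraverseA]; exact pvLe_refl v
    · intro row
      induction row with
      | nil => intro j v; rw [pvGoA]; exact pvLe_refl v
      | cons c rest ih =>
        intro j v
        rw [pvGoA]
        split
        · exact pvLe_trans (pvLe_trans (pvLe_set v j) ((by rw [pvTraverseA]; exact pvLe_refl _ : pvLe (v.set j true) (pvTraverseA computers 0 j (v.set j true))))) (ih (j+1) _)
        · exact ih (j+1) v
  | succ fuel ih =>
    have hg : ∀ row j v, pvLe v (pvGoA computers (fuel+1) row j v) := by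
      intro row
      induction row with
      | nil => intro j v; rw [pvGoA]; exact pvLe_refl v
      | cons c rest ihr =>
        intro j v
        rw [pvGoA]
        split
        · have h1 : pvLe v (v.set j true) := pvLe_set v j
          have h2 : pvLe (v.set j true) (pvTraverseA computers (fuel+1) j (v.set j true)) := by
            rw [pvTraverseA]
            exact (ih).2 _ _ _
          exact pvLe_trans (pvLe_trans h1 h2) (ihr (j+1) _)
        · exact ihr (j+1) v
    refine ⟨?_, hg⟩
    intro i v
    rw [pvTraverseA]
    exact (ih).2 _ _ _

theorem pvMonoA_T (computers : List (List Int)) (fuel : Nat) (i : Nat) (v : List Bool) :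
    pvLe v (pvTraverseA computers fuel i v) := (pvMonoA computers fuel).1 i v

theorem pvMonoA_G (computers : List (List Int)) (fuel : Nat) (row : List Int) (j : Nat) (v : List Bool) :
    pvLe v (pvGoA computers fuel row j v) := (pvMonoA computers fuel).2 row j v

theorem pvMonoScan (row : List Int) :
    ∀ j v stack, pvLe v (pvScanB row j v stack).1 := by
  induction row with
  | nil => intro j v stack; rw [pvScanB]; exact pvLe_refl v
  | cons c rest ih =>
    intro j v stack
    rw [pvScanB]
    split
    · exact pvLe_trans (pvLe_set v j) (ih (j+1) _ _)
    · exact ih (j+1) v stack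

theorem pvMonoB (computers : List (List Int)) :
    ∀ fuel stack v, pvLe v (pvRunB computers fuel stack v) := by
  intro fuel
  induction fuel with
  | zero => intro stack v; rw [pvRunB]; exact pvLe_refl v
  | succ fuel ih =>
    intro stack v
    cases stack with
    | nil => rw [pvRunB]; exact pvLe_refl v
    | cons u rest =>
      rw [pvRunB]
      exact pvLe_trans (pvMonoScan _ 0 v rest) (ih _ _)

-- ---------- soundness: everything newly marked is reachable ----------

theorem pvEdge_lt_row {computers : List (List Int)} {u m : Nat} (h : pvEdge computers u m) :
    m < (computers.getD u []).length := by
  by_contra hm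
  rw [pvEdge, List.getD_eq_default _ _ (Nat.le_of_not_lt hm)] at h
  omega

theorem pvCnt_pos {v : List Bool} {j : Nat} (hj : j < v.length) (hv : pvGv v j = false) :
    0 < pvCnt v := by
  have hsome : v[j]? = some v[j] := List.getElem?_eq_getElem hj
  have : v[j] = false := by simpa [pvGv, List.getD, hsome] using hv
  have hmem : false ∈ v := this ▸ List.getElem_mem hj
  exact List.count_pos_iff.mpr hmem

theorem pvGv_ne_of_setchange {v : List Bool} {j z : Nat}
    (h1 : pvGv (v.set j true) z = true) (h2 : pvGv v z = false) : z = j := by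
  by_contra hzj
  rw [pvGv_set_ne hzj] at h1
  simp [h1] at h2

theorem pvSoundA_G (computers : List (List Int)) (fuel : Nat)
    (hT : ∀ i v k, pvGv (pvTraverseA computers fuel i v) k = true →
      pvGv v k = true ∨ pvReach computers v i k) :
    ∀ row u j v k, row = (computers.getD u []).drop j →
      pvGv (pvGoA computers fuel row j v) k = true →
      pvGv v k = true ∨ pvReach computers v u k := by
  intro row
  induction row with
  | nil => intro u j v k _ h; rw [pvGoA] at h; exact Or.inl h
  | cons c rest ih =>
    intro u j v k hrow h
    have hrest : rest = (computers.getD u []).drop (j + 1) := (pvRow_tail hrow.symm).symm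
    rw [pvGoA] at h
    split at h
    · rename_i hcond
      have hedge : pvEdge computers u j := by
        rw [pvEdge, pvRow_head hrow.symm, hcond.1]
      have hstep : pvStep computers v u j := ⟨hedge, hcond.2⟩
      have hRuj : pvReach computers v u j := Relation.ReflTransGen.single hstep
      have hle1 : pvLe v (v.set j true) := pvLe_set v j
      have hle2 : pvLe (v.set j true) (pvTraverseA computers fuel j (v.set j true)) :=
        pvMonoA_T computers fuel j (v.set j true)
      rcases ih u (j + 1) _ k hrest h with h1 | h1
      · rcases hT j (v.set j true) k h1 with h2 | h2
        · by_cases hkj : k = j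
          · subst hkj; exact Or.inr hRuj
          · rw [pvGv_set_ne hkj] at h2; exact Or.inl h2
        · exact Or.inr (hRuj.trans (pvReach_anti hle1 h2))
      · exact Or.inr (pvReach_anti (pvLe_trans hle1 hle2) h1)
    · exact ih u (j + 1) v k hrest h

theorem pvSoundA (computers : List (List Int)) :
    ∀ fuel i v k, pvGv (pvTraverseA computers fuel i v) k = true →
      pvGv v k = true ∨ pvReach computers v i k := by
  intro fuel
  induction fuel with
  | zero => intro i v k h; rw [pvTraverseA] at h; exact Or.inl h
  | succ fuel ih =>
    intro i v k h
    rw [pvTraverseA] at h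
    exact pvSoundA_G computers fuel ih _ i 0 v k (by rw [List.drop_zero]) h

-- ---------- scan lemmas for B ----------

theorem pvScanB_stack_sub :
    ∀ (row : List Int) (j : Nat) (v : List Bool) (st : List Nat) (z : Nat),
      z ∈ st → z ∈ (pvScanB row j v st).2 := by
  intro row
  induction row with
  | nil => intro j v st z hz; rw [pvScanB]; exact hz
  | cons c rest ih =>
    intro j v st z hz
    rw [pvScanB]
    split
    · exact ih (j + 1) _ _ z (by simp [hz])
    · exact ih (j + 1) v st z hz

theorem pvScanB_sound (computers : List (List Int)) :
    ∀ (row : List Int) (u j : Nat) (v : List Bool) (st : List Nat) (k : Nat),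
      row = (computers.getD u []).drop j →
      pvGv (pvScanB row j v st).1 k = true →
      pvGv v k = true ∨ (pvEdge computers u k ∧ pvGv v k = false) := by
  intro row
  induction row with
  | nil => intro u j v st k _ h; rw [pvScanB] at h; exact Or.inl h
  | cons c rest ih =>
    intro u j v st k hrow h
    have hrest : rest = (computers.getD u []).drop (j + 1) := (pvRow_tail hrow.symm).symm
    rw [pvScanB] at h
    split at h
    · rename_i hcond
      have hedge : pvEdge computers u j := by
        rw [pvEdge, pvRow_head hrow.symm, hcond.1]
      rcases ih u (j + 1) _ _ k hrest h with h1 | h1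
      · by_cases hkj : k = j
        · subst hkj; exact Or.inr ⟨hedge, hcond.2⟩
        · rw [pvGv_set_ne hkj] at h1; exact Or.inl h1
      · refine Or.inr ⟨h1.1, ?_⟩
        cases hv : pvGv v k
        · rfl
        · exact absurd ((pvLe_set v j).2 k hv) (by simp [h1.2])
    · exact ih u (j + 1) v st k hrest h

theorem pvScanB_stack (computers : List (List Int)) {N : Nat} (hb : pvBnd computers N) :
    ∀ (row : List Int) (u j : Nat) (v : List Bool) (st : List Nat) (z : Nat),
      v.length = N → u < N → row = (computers.getD u []).drop j →
      z ∈ (pvScanB row j v st).2 →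
      z ∈ st ∨ (pvEdge computers u z ∧ pvGv v z = false ∧ pvGv (pvScanB row j v st).1 z = true) := by
  intro row
  induction row with
  | nil => intro u j v st z _ _ _ hz; rw [pvScanB] at hz; exact Or.inl hz
  | cons c rest ih =>
    intro u j v st z hlen hu hrow hz
    have hrest : rest = (computers.getD u []).drop (j + 1) := (pvRow_tail hrow.symm).symm
    rw [pvScanB] at hz ⊢
    split at hz
    · rename_i hcond
      split
      · rcases ih u (j + 1) _ _ z (by simp [hlen]) hu hrest hz with h1 | h1
        · rcases List.mem_cons.mp h1 with h2 | h2
          · subst h2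
            have hedge : pvEdge computers u z := by
              rw [pvEdge, pvRow_head hrow.symm, hcond.1]
            have hzv : z < v.length := by
              have := hb u z hu hedge
              omega
            refine Or.inr ⟨hedge, hcond.2, ?_⟩
            exact (pvMonoScan rest (z + 1) (v.set z true) (z :: st)).2 z (pvGv_set_self hzv)
          · exact Or.inl h2
        · refine Or.inr ⟨h1.1, ?_, h1.2.2⟩
          cases hv : pvGv v z
          · rfl
          · exact absurd ((pvLe_set v j).2 z hv) (by simp [h1.2.1])
      · rename_i hc; exact absurd hcond hc
    · rename_i hc
      split
      · rename_i hc2; exact absurd hc2 hc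
      · exact ih u (j + 1) v st z hlen hu hrest hz

theorem pvScanB_marks (computers : List (List Int)) {N : Nat} (hb : pvBnd computers N) :
    ∀ (row : List Int) (u j : Nat) (v : List Bool) (st : List Nat) (m : Nat),
      v.length = N → u < N → row = (computers.getD u []).drop j → j ≤ m →
      pvEdge computers u m → pvGv (pvScanB row j v st).1 m = true := by
  intro row
  induction row with
  | nil =>
    intro u j v st m _ _ hrow hjm hedge
    have h1 : (computers.getD u []).length ≤ j := List.drop_eq_nil_iff.mp hrow.symm
    exact absurd (pvEdge_lt_row hedge) (by omega)
  | cons c rest ih =>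
    intro u j v st m hlen hu hrow hjm hedge
    have hrest : rest = (computers.getD u []).drop (j + 1) := (pvRow_tail hrow.symm).symm
    rw [pvScanB]
    by_cases hmj : m = j
    · subst hmj
      have hc : c = 1 := by rw [← pvRow_head hrow.symm]; exact hedge
      have hmv : m < v.length := by
        have := hb u m hu hedge
        omega
      split
      · exact (pvMonoScan rest (m + 1) (v.set m true) (m :: st)).2 m (pvGv_set_self hmv)
      · rename_i hcond
        have hvm : pvGv v m = true := by
          rcases Decidable.not_and_iff_not_or_not.mp hcond with h | h
          · exact absurd hc h
          · cases hv : pvGv v m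
            · exact absurd hv h
            · rfl
        exact (pvMonoScan rest (m + 1) v st).2 m hvm
    · have hjm' : j + 1 ≤ m := by omega
      split
      · exact ih u (j + 1) _ _ m (by simp [hlen]) hu hrest hjm' hedge
      · exact ih u (j + 1) v st m hlen hu hrest hjm' hedge

theorem pvScanB_new :
    ∀ (row : List Int) (j : Nat) (v : List Bool) (st : List Nat) (z : Nat),
      pvGv (pvScanB row j v st).1 z = true → pvGv v z = false →
      z ∈ (pvScanB row j v st).2 := by
  intro row
  induction row with
  | nil => intro j v st z h1 h2; rw [pvScanB] at h1; simp [h1] at h2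
  | cons c rest ih =>
    intro j v st z h1 h2
    rw [pvScanB] at h1 ⊢
    split at h1
    · split
      · by_cases hzj : z = j
        · subst hzj
          exact pvScanB_stack_sub rest (z + 1) _ _ z (by simp)
        · refine ih (j + 1) _ _ z h1 ?_
          rw [pvGv_set_ne hzj]; exact h2
      · rename_i hc hc2; exact absurd hc hc2
    · split
      · rename_i hc2 hc; exact absurd hc hc2
      · exact ih (j + 1) v st z h1 h2

theorem pvScanB_cnt (computers : List (List Int)) {N : Nat} (hb : pvBnd computers N) :
    ∀ (row : List Int) (u j : Nat) (v : List Bool) (st : List Nat),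
      v.length = N → u < N → row = (computers.getD u []).drop j →
      pvCnt (pvScanB row j v st).1 + (pvScanB row j v st).2.length = pvCnt v + st.length := by
  intro row
  induction row with
  | nil => intro u j v st _ _ _; rw [pvScanB]
  | cons c rest ih =>
    intro u j v st hlen hu hrow
    have hrest : rest = (computers.getD u []).drop (j + 1) := (pvRow_tail hrow.symm).symm
    rw [pvScanB]
    split
    · rename_i hcond
      have hedge : pvEdge computers u j := by
        rw [pvEdge, pvRow_head hrow.symm, hcond.1]
      have hjN : j < N := hb u j hu hedge
      have hjv : j < v.length := by omega
      have hcnt : pvCnt (v.set j true) + 1 = pvCnt v := pvCnt_set hjv hcond.2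
      have := ih u (j + 1) (v.set j true) (j :: st) (by simp [hlen]) hu hrest
      rw [this]
      simp
      omega
    · exact ih u (j + 1) v st hlen hu hrest

theorem pvSoundB (computers : List (List Int)) {N : Nat} (hb : pvBnd computers N) :
    ∀ fuel stack v k, v.length = N → (∀ s ∈ stack, pvGv v s = true) →
      pvGv (pvRunB computers fuel stack v) k = true →
      pvGv v k = true ∨ ∃ s ∈ stack, pvReach computers v s k := by
  intro fuel
  induction fuel with
  | zero => intro stack v k _ _ h; rw [pvRunB] at h; exact Or.inl h
  | succ fuel ih =>
    intro stack v k hlen hstack h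
    cases stack with
    | nil => rw [pvRunB] at h; exact Or.inl h
    | cons u rest =>
      rw [pvRunB] at h
      set p := pvScanB (computers.getD u []) 0 v rest with hp
      have hrow : (computers.getD u []) = (computers.getD u []).drop 0 := List.drop_zero.symm
      have hle : pvLe v p.1 := by rw [hp]; exact pvMonoScan _ 0 v rest
      have huN : u < N := by
        have := pvGv_lt (hstack u (by simp))
        omega
      have hlen' : p.1.length = N := hle.1 ▸ hlen
      have hstack' : ∀ s ∈ p.2, pvGv p.1 s = true := by
        intro s hs
        rcases pvScanB_stack computers hb _ u 0 v rest s hlen huN hrow hs with h1 | h1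
        · exact hle.2 s (hstack s (by simp [h1]))
        · exact h1.2.2
      rcases ih p.2 p.1 k hlen' hstack' h with h1 | ⟨s, hs, hr⟩
      · rcases pvScanB_sound computers _ u 0 v rest k hrow h1 with h2 | h2
        · exact Or.inl h2
        · exact Or.inr ⟨u, by simp, Relation.ReflTransGen.single (r := pvStep computers v) ⟨h2.1, h2.2⟩⟩
      · have hr' : pvReach computers v s k := pvReach_anti hle hr
        rcases pvScanB_stack computers hb _ u 0 v rest s hlen huN hrow hs with h2 | h2
        · exact Or.inr ⟨s, by simp [h2], hr'⟩
        · exact Or.inr ⟨u, by simp,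
            (Relation.ReflTransGen.single (r := pvStep computers v) ⟨h2.1, h2.2.1⟩).trans hr'⟩

-- ---------- closedness ----------

theorem pvClosedA_G (computers : List (List Int)) {N : Nat} (hb : pvBnd computers N) (fuel : Nat)
    (hCT : ∀ i v, v.length = N → i < N → pvGv v i = true → pvCnt v < fuel →
      ∀ z, (z = i ∨ (pvGv (pvTraverseA computers fuel i v) z = true ∧ pvGv v z = false)) →
        ∀ w, pvEdge computers z w → pvGv (pvTraverseA computers fuel i v) w = true) :
    ∀ (row : List Int) (u j : Nat) (v : List Bool), v.length = N → u < N → pvGv v u = true →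
      pvCnt v ≤ fuel → row = (computers.getD u []).drop j →
      (∀ m, j ≤ m → pvEdge computers u m → pvGv (pvGoA computers fuel row j v) m = true) ∧
      (∀ z, pvGv (pvGoA computers fuel row j v) z = true → pvGv v z = false →
        ∀ w, pvEdge computers z w → pvGv (pvGoA computers fuel row j v) w = true) := by
  intro row
  induction row with
  | nil =>
    intro u j v hlen hu hvu hfuel hrow
    rw [pvGoA]
    constructor
    · intro m hjm hedge
      have h1 : (computers.getD u []).length ≤ j := List.drop_eq_nil_iff.mp hrow.symm
      exact absurd (pvEdge_lt_row hedge) (by omega)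
    · intro z h1 h2; simp [h1] at h2
  | cons c rest ih =>
    intro u j v hlen hu hvu hfuel hrow
    have hrest : rest = (computers.getD u []).drop (j + 1) := (pvRow_tail hrow.symm).symm
    rw [pvGoA]
    split
    · rename_i hcond
      have hedge : pvEdge computers u j := by
        rw [pvEdge, pvRow_head hrow.symm, hcond.1]
      have hjN : j < N := hb u j hu hedge
      have hjv : j < v.length := by omega
      have hcnt1 : pvCnt (v.set j true) + 1 = pvCnt v := pvCnt_set hjv hcond.2
      have hcpos : 0 < pvCnt v := pvCnt_pos hjv hcond.2
      have hlen' : (v.set j true).length = N := by simp [hlen]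
      have hvj' : pvGv (v.set j true) j = true := pvGv_set_self hjv
      have hfuel' : pvCnt (v.set j true) < fuel := by omega
      -- the nested recursive traversal
      have hT := hCT j (v.set j true) hlen' hjN hvj' hfuel'
      set v1 := pvTraverseA computers fuel j (v.set j true) with hv1
      have hle01 : pvLe v (v.set j true) := pvLe_set v j
      have hle12 : pvLe (v.set j true) v1 := pvMonoA_T computers fuel j (v.set j true)
      have hle02 : pvLe v v1 := pvLe_trans hle01 hle12
      have hcnt2 : pvCnt v1 ≤ fuel := by
        have := pvCnt_le_of_le hle12
        omega
      have ihh := ih u (j + 1) v1 (hle02.1 ▸ hlen) hu (hle02.2 u hvu) hcnt2 hrest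
      set r := pvGoA computers fuel rest (j + 1) v1 with hr
      have hle2r : pvLe v1 r := pvMonoA_G computers fuel rest (j + 1) v1
      constructor
      · intro m hjm hedgem
        by_cases hmj : m = j
        · subst hmj; exact hle2r.2 m (hle12.2 m hvj')
        · exact ihh.1 m (by omega) hedgem
      · intro z h1 h2 w hw
        by_cases hz1 : pvGv v1 z = true
        · by_cases hz0 : pvGv (v.set j true) z = true
          · have hzj : z = j := pvGv_ne_of_setchange hz0 h2
            subst hzj
            exact hle2r.2 w (hT z (Or.inl rfl) w hw)
          · have hz0' : pvGv (v.set j true) z = false := by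
              cases hgv : pvGv (v.set j true) z
              · rfl
              · exact absurd hgv hz0
            exact hle2r.2 w (hT z (Or.inr ⟨hz1, hz0'⟩) w hw)
        · have hz1' : pvGv v1 z = false := by
            cases hgv : pvGv v1 z
            · rfl
            · exact absurd hgv hz1
          exact ihh.2 z h1 hz1' w hw
    · rename_i hcond
      have ihh := ih u (j + 1) v hlen hu hvu hfuel hrest
      constructor
      · intro m hjm hedgem
        by_cases hmj : m = j
        · subst hmj
          have hc : c = 1 := by rw [← pvRow_head hrow.symm]; exact hedgem
          have hvm : pvGv v m = true := by
            rcases Decidable.not_and_iff_not_or_not.mp hcond with h | h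
            · exact absurd hc h
            · cases hv : pvGv v m
              · exact absurd hv h
              · rfl
          exact (pvMonoA_G computers fuel rest (m + 1) v).2 m hvm
        · exact ihh.1 m (by omega) hedgem
      · exact ihh.2

theorem pvClosedA_T (computers : List (List Int)) {N : Nat} (hb : pvBnd computers N) :
    ∀ fuel : Nat,
      ∀ i v, v.length = N → i < N → pvGv v i = true → pvCnt v < fuel →
        ∀ z, (z = i ∨ (pvGv (pvTraverseA computers fuel i v) z = true ∧ pvGv v z = false)) →
          ∀ w, pvEdge computers z w → pvGv (pvTraverseA computers fuel i v) w = true := by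
  intro fuel
  induction fuel with
  | zero => intro i v _ _ _ hcnt; omega
  | succ fuel ih =>
    intro i v hlen hi hvi hcnt z hz w hw
    have e : pvTraverseA computers (fuel + 1) i v = pvGoA computers fuel (computers.getD i []) 0 v := by
      rw [pvTraverseA]
    rw [e] at hz ⊢
    have hG := pvClosedA_G computers hb fuel ih (computers.getD i []) i 0 v hlen hi hvi
      (by omega) List.drop_zero.symm
    rcases hz with hz | hz
    · subst hz; exact hG.1 w (Nat.zero_le w) hw
    · exact hG.2 z hz.1 hz.2 w hw

theorem pvClosedB (computers : List (List Int)) {N : Nat} (hb : pvBnd computers N) :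
    ∀ fuel stack v, v.length = N → (∀ s ∈ stack, pvGv v s = true) →
      pvCnt v + stack.length ≤ fuel →
      ∀ z, (z ∈ stack ∨ (pvGv (pvRunB computers fuel stack v) z = true ∧ pvGv v z = false)) →
        ∀ w, pvEdge computers z w → pvGv (pvRunB computers fuel stack v) w = true := by
  intro fuel
  induction fuel with
  | zero =>
    intro stack v _ _ hfuel z hz w hw
    have hstack : stack = [] := by
      cases stack with
      | nil => rfl
      | cons a t => simp at hfuel
    subst hstack
    rw [pvRunB] at hz ⊢
    rcases hz with hz | hz
    · simp at hz
    · simp [hz.1] at hz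
  | succ fuel ih =>
    intro stack v hlen hstack hfuel z hz w hw
    cases stack with
    | nil =>
      rw [pvRunB] at hz ⊢
      rcases hz with hz | hz
      · simp at hz
      · simp [hz.1] at hz
    | cons u rest =>
      rw [pvRunB] at hz ⊢
      set p := pvScanB (computers.getD u []) 0 v rest with hp
      have hrow : (computers.getD u []) = (computers.getD u []).drop 0 := List.drop_zero.symm
      have hle : pvLe v p.1 := by rw [hp]; exact pvMonoScan _ 0 v rest
      have huN : u < N := by
        have := pvGv_lt (hstack u (by simp))
        omega
      have hlen' : p.1.length = N := hle.1 ▸ hlen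
      have hstack' : ∀ s ∈ p.2, pvGv p.1 s = true := by
        intro s hs
        rcases pvScanB_stack computers hb _ u 0 v rest s hlen huN hrow hs with h1 | h1
        · exact hle.2 s (hstack s (by simp [h1]))
        · exact h1.2.2
      have hcnt : pvCnt p.1 + p.2.length ≤ fuel := by
        have := pvScanB_cnt computers hb (computers.getD u []) u 0 v rest hlen huN hrow
        rw [← hp] at this
        simp at hfuel
        omega
      have hrun : pvLe p.1 (pvRunB computers fuel p.2 p.1) := pvMonoB computers fuel p.2 p.1
      rcases hz with hz | hz
      · rcases List.mem_cons.mp hz with hz1 | hz1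
        · subst hz1
          exact hrun.2 w (pvScanB_marks computers hb _ z 0 v rest w hlen huN hrow (Nat.zero_le w) hw)
        · exact ih p.2 p.1 hlen' hstack' hcnt z (Or.inl (pvScanB_stack_sub _ 0 v rest z hz1)) w hw
      · by_cases hz1 : pvGv p.1 z = true
        · exact ih p.2 p.1 hlen' hstack' hcnt z
            (Or.inl (pvScanB_new _ 0 v rest z hz1 hz.2)) w hw
        · have hz1' : pvGv p.1 z = false := by
            cases hgv : pvGv p.1 z
            · rfl
            · exact absurd hgv hz1
          exact ih p.2 p.1 hlen' hstack' hcnt z (Or.inr ⟨hz.1, hz1'⟩) w hw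

-- ---------- generic completeness from closedness ----------

theorem pvComplete (computers : List (List Int)) {v r : List Bool} {i : Nat}
    (_hmono : ∀ k, pvGv v k = true → pvGv r k = true) (hri : pvGv r i = true)
    (hclosed : ∀ z, (z = i ∨ (pvGv r z = true ∧ pvGv v z = false)) →
      ∀ w, pvEdge computers z w → pvGv r w = true) :
    ∀ k, pvReach computers v i k → pvGv r k = true := by
  have main : ∀ k, pvReach computers v i k → pvGv r k = true ∧ (k = i ∨ pvGv v k = false) := by
    intro k h
    induction h with
    | refl => exact ⟨hri, Or.inl rfl⟩
    | tail hab hbc ih =>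
      rename_i b c
      refine ⟨?_, Or.inr hbc.2⟩
      refine hclosed b ?_ c hbc.1
      rcases ih.2 with h | h
      · exact Or.inl h
      · exact Or.inr ⟨ih.1, h⟩
  exact fun k h => (main k h).1

-- ---------- characterizations ----------

theorem pvCharA (computers : List (List Int)) {N : Nat} (hb : pvBnd computers N)
    {fuel i : Nat} {v : List Bool} (hlen : v.length = N) (hi : i < N)
    (hvi : pvGv v i = true) (hfuel : pvCnt v < fuel) :
    ∀ k, pvGv (pvTraverseA computers fuel i v) k = true ↔
      (pvGv v k = true ∨ pvReach computers v i k) := by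
  intro k
  constructor
  · exact fun h => pvSoundA computers fuel i v k h
  · rintro (h | h)
    · exact (pvMonoA_T computers fuel i v).2 k h
    · exact pvComplete computers (pvMonoA_T computers fuel i v).2
        ((pvMonoA_T computers fuel i v).2 i hvi)
        (pvClosedA_T computers hb fuel i v hlen hi hvi hfuel) k h

theorem pvCharB (computers : List (List Int)) {N : Nat} (hb : pvBnd computers N)
    {fuel i : Nat} {v : List Bool} (hlen : v.length = N)
    (hvi : pvGv v i = true) (hfuel : pvCnt v + 1 ≤ fuel) :
    ∀ k, pvGv (pvRunB computers fuel [i] v) k = true ↔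
      (pvGv v k = true ∨ pvReach computers v i k) := by
  intro k
  constructor
  · intro h
    rcases pvSoundB computers hb fuel [i] v k hlen (by intro s hs; simp at hs; subst hs; exact hvi) h with h | ⟨s, hs, hr⟩
    · exact Or.inl h
    · simp at hs; subst hs; exact Or.inr hr
  · rintro (h | h)
    · exact (pvMonoB computers fuel [i] v).2 k h
    · refine pvComplete computers (pvMonoB computers fuel [i] v).2
        ((pvMonoB computers fuel [i] v).2 i hvi) ?_ k h
      intro z hz w hw
      refine pvClosedB computers hb fuel [i] v hlen ?_ (by simpa using hfuel) z ?_ w hw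
      · intro s hs; simp at hs; subst hs; exact hvi
      · rcases hz with h | h
        · exact Or.inl (by simp [h])
        · exact Or.inr h

-- ---------- the outer loops agree ----------

theorem pvLoopEq (computers : List (List Int)) {N : Nat} (hb : pvBnd computers N) :
    ∀ idxs answer v, v.length = N → (∀ i ∈ idxs, i < N) →
      pvLoopA computers (N + 1) idxs answer v = pvLoopB computers (N + 1) idxs answer v := by
  intro idxs
  induction idxs with
  | nil => intro answer v _ _; rw [pvLoopA, pvLoopB]
  | cons i rest ih =>
    intro answer v hlen hidx
    have hiN : i < N := hidx i (by simp)
    rw [pvLoopA, pvLoopB]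
    split
    · rename_i hvi
      set v' := v.set i true with hv'
      have hlen' : v'.length = N := by simp [hv', hlen]
      have hvi' : pvGv v' i = true := by
        rw [hv']; exact pvGv_set_self (by omega)
      have hcnt : pvCnt v' < N + 1 := Nat.lt_succ_of_le ((pvCnt_le_length v').trans_eq hlen')
      have hAB : pvTraverseA computers (N + 1) i v' = pvRunB computers (N + 1) [i] v' := by
        apply pvList_eq_of_gv
        · exact (pvMonoA_T computers (N+1) i v').1.symm.trans (pvMonoB computers (N+1) [i] v').1
        · intro k
          have h1 := pvCharA computers hb hlen' hiN hvi' hcnt k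
          have h2 := pvCharB computers hb (fuel := N + 1) hlen' hvi' (by omega) k
          cases hA : pvGv (pvTraverseA computers (N + 1) i v') k
          · cases hB : pvGv (pvRunB computers (N + 1) [i] v') k
            · rfl
            · exact absurd (h1.mpr (h2.mp hB)) (by simp [hA])
          · exact (h2.mpr (h1.mp hA)).symm
      rw [hAB]
      exact ih (answer + 1) _ ((pvMonoB computers (N+1) [i] v').1.symm.trans hlen')
        (fun a ha => hidx a (by simp [ha]))
    · exact ih answer v hlen (fun a ha => hidx a (by simp [ha]))

-- ===== VERDICT (by name: the statement is the Claim_ definition above) =====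
theorem solution_spec : Claim_equal_solution := by
  intro n computers _ hpre
  unfold Spec_solution solution solution_alt
  have hb : pvBnd computers n.toNat := by
    intro a b ha hab
    rcases hpre with ⟨_, h2⟩
    by_cases hbl : b < (computers.getD a []).length
    · exact h2 a (by simpa using ha) b (by simpa using hbl) hab
    · exfalso
      have : (computers.getD a []).getD b 0 = 0 :=
        List.getD_eq_default _ _ (Nat.le_of_not_lt hbl)
      rw [pvEdge, this] at hab
      omega
  exact pvLoopEq computers hb (List.range n.toNat) 0 (List.replicate n.toNat false)
    (by simp) (fun i hi => by simpa using hi)
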